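-- pv_equiv track=rewrite | github.com/yingzhuo1994/LeetCode | 0565_ArrayNesting.py | arrayNesting
-- ===== SOURCE A (Python) =====
-- from typing import List
--
-- def arrayNesting(nums: List[int]) -> int:
--     def dfs(idx, visited, depth=0):
--         if idx in visited:
--             return depth
--         visited.add(idx)
--         return dfs(nums[idx], visited, depth + 1)
--     ans = 0
--     visited = set()
--     for i in range(len(nums)):
--         length = dfs(i, visited)
--         ans = max(ans, length)
--     return ans
-- ===== SOURCE B (Python) =====
-- from typing import List
--
-- def arrayNesting(nums: List[int]) -> int:
--     # Single flat state machine: no inner loop/recursion per start index.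
--     # One while loop interleaves "advance along the current chain" and
--     # "finish the chain, record its length, move to the next start".
--     n = len(nums)
--     best = 0
--     count = 0
--     i = 0
--     idx = 0
--     visited = set()
--     while i < n:
--         if idx in visited:
--             best = max(best, count)
--             i += 1
--             idx = i
--             count = 0
--         else:
--             visited.add(idx)
--             count += 1
--             idx = nums[idx]
--     return best
-- ===== Notes on version B (the rewrite author's own statement) =====
-- stated objective: alternative
-- what changed: A's per-index recursive dfs with a depth accumulator is replaced by a single flat while-loop state machine over (i, idx, count, best, visited) that interleaves chain advancement and chain completion, with no inner loop or recursion.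
import Mathlib
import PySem

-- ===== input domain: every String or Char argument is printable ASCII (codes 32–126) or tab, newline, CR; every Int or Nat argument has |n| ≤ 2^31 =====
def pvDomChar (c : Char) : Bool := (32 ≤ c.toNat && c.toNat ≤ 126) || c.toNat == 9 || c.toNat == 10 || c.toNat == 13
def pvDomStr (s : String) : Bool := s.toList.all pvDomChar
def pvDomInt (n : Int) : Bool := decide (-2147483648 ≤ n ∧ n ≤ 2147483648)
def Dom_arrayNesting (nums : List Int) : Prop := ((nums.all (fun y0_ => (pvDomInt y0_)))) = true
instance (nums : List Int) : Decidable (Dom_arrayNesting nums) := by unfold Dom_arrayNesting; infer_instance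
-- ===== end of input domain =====

-- B replaces A's per-index recursive dfs by a single flat while-loop state machine over
-- (i, idx, count, best, visited) with no inner loop or recursion; objective: alternative.

-- ===== PORT A =====
-- dfs(idx, visited, depth): recursion ported with fuel (2*len+1 suffices for every
-- terminating run: each recursive step adds a new element of [-len, len) to visited);
-- none = fuel exhausted or IndexError (excluded by Pre_).
def pvDfsA (nums : List Int) : Nat → Int → PySem.Set Int → Int → Option (Int × PySem.Set Int)
  | 0, _, _, _ => none
  | f + 1, idx, visited, depth =>
    if PySem.Set.contains visited idx then some (depth, visited)
    else
      match PySem.List.pyGet? nums idx with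
      | none => none
      | some v => pvDfsA nums f v (PySem.Set.add visited idx) (depth + 1)

-- the loop body 'length = dfs(i, visited); ans = max(ans, length)' as a fold step
def pvStepA (nums : List Int) (st : Option (Int × PySem.Set Int)) (i : Int) :
    Option (Int × PySem.Set Int) :=
  match st with
  | none => none
  | some (ans, visited) =>
    match pvDfsA nums (2 * nums.length + 1) i visited 0 with
    | none => none
    | some (length, visited') => some (max ans length, visited')

def arrayNesting (nums : List Int) : Int :=
  match (PySem.List.pyRange 0 nums.length 1).foldl (pvStepA nums)
      (some ((0 : Int), ([] : PySem.Set Int))) with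
  | some (ans, _) => ans
  | none => 0

-- ===== PORT B =====
-- the single while loop of Source B, one fuel-counted recursion over the whole state
-- (i, idx, count, best, visited); none = fuel exhausted or IndexError (excluded by Pre_).
-- Total fuel n*(2n+1)+1 suffices: each of the n chains takes at most 2n+1 steps.
def pvLoopB (nums : List Int) :
    Nat → Int → Int → Int → Int → PySem.Set Int → Option Int
  | 0, _, _, _, _, _ => none
  | f + 1, i, idx, count, best, visited =>
    if i < (nums.length : Int) then
      if PySem.Set.contains visited idx then
        pvLoopB nums f (i + 1) (i + 1) 0 (max best count) visited
      else
        match PySem.List.pyGet? nums idx with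
        | none => none
        | some v => pvLoopB nums f i v (count + 1) best (PySem.Set.add visited idx)
    else some best

def arrayNesting_alt (nums : List Int) : Int :=
  match pvLoopB nums (nums.length * (2 * nums.length + 1) + 1) 0 0 0 0
      ([] : PySem.Set Int) with
  | some best => best
  | none => 0

-- ===== PRECONDITION & SPEC =====
-- Pre_ = exactly the inputs where the Python A returns: every value is a valid
-- (possibly negative, Python-wraparound) index, so no reached index raises IndexError.
def Pre_arrayNesting (nums : List Int) : Prop :=
  ∀ v ∈ nums, -(nums.length : Int) ≤ v ∧ v < (nums.length : Int)
instance (nums : List Int) : Decidable (Pre_arrayNesting nums) := by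
  unfold Pre_arrayNesting; infer_instance

def pvWitness_arrayNesting : List Int := [1, 0, 2, -1]

def Spec_arrayNesting (nums : List Int) (out : Int) : Prop := out = arrayNesting_alt nums
instance (nums : List Int) (out : Int) : Decidable (Spec_arrayNesting nums out) := by
  unfold Spec_arrayNesting; infer_instance

-- ===== CLAIM (what is proved, stated in full; the proofs are below) =====
def Claim_equal_arrayNesting : Prop := ∀ (nums : List Int), Dom_arrayNesting nums → Pre_arrayNesting nums → Spec_arrayNesting nums (arrayNesting nums)

-- ===== LEMMAS AND PROOFS =====

/-- a nodup list of integers of [-n, n) has at most 2n elements -/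
theorem pvVisLen (n : Nat) (vis : List Int) (hnd : vis.Nodup)
    (hb : ∀ x ∈ vis, -(n : Int) ≤ x ∧ x < (n : Int)) : vis.length ≤ 2 * n := by
  have h1 : vis.length = vis.toFinset.card := (List.toFinset_card_of_nodup hnd).symm
  have h2 : vis.toFinset ⊆ Finset.Icc (-(n:Int)) ((n:Int) - 1) := by
    intro x hx
    simp only [List.mem_toFinset] at hx
    have := hb x hx
    simp only [Finset.mem_Icc]
    omega
  have h3 := Finset.card_le_card h2
  rw [Int.card_Icc] at h3
  omega

/-- totality of A's dfs under Pre_: with fuel beyond 2n + 1 - |visited| it returns,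
    preserving the visited-set invariants -/
theorem pvDfsA_total (nums : List Int) (hpre : Pre_arrayNesting nums) :
    ∀ (f : Nat) (idx : Int) (vis : PySem.Set Int) (count : Int),
      vis.Nodup → (∀ x ∈ vis, -(nums.length : Int) ≤ x ∧ x < (nums.length : Int)) →
      -(nums.length : Int) ≤ idx → idx < (nums.length : Int) →
      2 * nums.length + 1 ≤ f + vis.length →
      ∃ d vis', pvDfsA nums f idx vis count = some (d, vis') ∧
        vis'.Nodup ∧ (∀ x ∈ vis', -(nums.length : Int) ≤ x ∧ x < (nums.length : Int)) := by
  intro f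
  induction f with
  | zero =>
    intro idx vis count hnd hb _ _ hfuel
    exfalso
    have := pvVisLen nums.length vis hnd hb
    omega
  | succ f ih =>
    intro idx vis count hnd hb hlo hhi hfuel
    rw [pvDfsA]
    by_cases hc : PySem.Set.contains vis idx = true
    · rw [if_pos hc]
      exact ⟨count, vis, rfl, hnd, hb⟩
    · rw [if_neg hc]
      have hmem : idx ∉ vis := by simpa [PySem.Set.contains] using hc
      have hget : ∃ v, PySem.List.pyGet? nums idx = some v := by
        cases hg : PySem.List.pyGet? nums idx with
        | none =>
          rw [PySem.List.pyGet?_eq_none_iff] at hg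
          exact absurd ⟨hlo, hhi⟩ hg
        | some v => exact ⟨v, rfl⟩
      obtain ⟨v, hv⟩ := hget
      rw [hv]
      have hvmem : v ∈ nums := PySem.List.mem_of_pyGet?_eq_some (h := hv)
      have hvb := hpre v hvmem
      have hadd : PySem.Set.add vis idx = vis ++ [idx] := by
        simp only [PySem.Set.add]; rw [if_neg hc]
      have hnd' : (PySem.Set.add vis idx).Nodup := by
        rw [hadd]; simp [List.nodup_append, hnd]; intro a ha he; exact hmem (he ▸ ha)
      have hb' : ∀ x ∈ PySem.Set.add vis idx, -(nums.length : Int) ≤ x ∧ x < (nums.length : Int) := by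
        intro x hx
        rw [hadd, List.mem_append] at hx
        rcases hx with hx | hx
        · exact hb x hx
        · simp at hx; subst hx; exact ⟨hlo, hhi⟩
      have hlen : (PySem.Set.add vis idx).length = vis.length + 1 := by
        rw [hadd]; simp
      exact ih v (PySem.Set.add vis idx) (count + 1) hnd' hb' hvb.1 hvb.2 (by omega)

/-- bridge: one chain of A's dfs corresponds to a prefix of B's flat loop -/
theorem pvBridge (nums : List Int) :
    ∀ (fA : Nat) (idx : Int) (vis : PySem.Set Int) (count d : Int) (vis' : PySem.Set Int),
      pvDfsA nums fA idx vis count = some (d, vis') →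
      ∀ (f : Nat) (i best : Int), i < (nums.length : Int) →
        ∃ g, f ≤ g ∧
          pvLoopB nums (fA + f) i idx count best vis =
            pvLoopB nums g (i + 1) (i + 1) 0 (max best d) vis' := by
  intro fA
  induction fA with
  | zero => intro idx vis count d vis' h; exact absurd h (by simp [pvDfsA])
  | succ fA ih =>
    intro idx vis count d vis' h f i best hi
    rw [pvDfsA] at h
    have hstep : fA + 1 + f = (fA + f) + 1 := by omega
    rw [hstep, pvLoopB, if_pos hi]
    by_cases hc : PySem.Set.contains vis idx = true
    · rw [if_pos hc] at h
      rw [if_pos hc]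
      obtain ⟨hd, hv⟩ : count = d ∧ vis = vis' := by
        injection h with h'; injection h' with h1 h2; exact ⟨h1, h2⟩
      subst hd; subst hv
      exact ⟨fA + f, by omega, rfl⟩
    · rw [if_neg hc] at h
      rw [if_neg hc]
      cases hg : PySem.List.pyGet? nums idx with
      | none => rw [hg] at h; exact absurd h (by simp)
      | some v =>
        rw [hg] at h
        simpa using ih v (PySem.Set.add vis idx) (count + 1) d vis' h f i best hi

/-- the outer correspondence: the tail of A's fold vs B's loop from start index n - k -/
theorem pvOuter (nums : List Int) (hpre : Pre_arrayNesting nums) :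
    ∀ (k : Nat), k ≤ nums.length → ∀ (best : Int) (vis : PySem.Set Int) (g : Nat),
      vis.Nodup → (∀ x ∈ vis, -(nums.length : Int) ≤ x ∧ x < (nums.length : Int)) →
      k * (2 * nums.length + 1) + 1 ≤ g →
      ∃ best' vis',
        (PySem.List.pyRange ((nums.length : Int) - k) nums.length 1).foldl
          (pvStepA nums) (some (best, vis)) = some (best', vis') ∧
        pvLoopB nums g ((nums.length : Int) - k) ((nums.length : Int) - k) 0 best vis =
          some best' := by
  intro k
  induction k with
  | zero =>
    intro _ best vis g hnd hb hg
    refine ⟨best, vis, ?_, ?_⟩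
    · rw [PySem.List.pyRange_one_eq_nil (by omega)]; rfl
    · obtain ⟨g', rfl⟩ : ∃ g', g = g' + 1 := ⟨g - 1, by omega⟩
      rw [pvLoopB, if_neg (by omega)]
  | succ k ih =>
    intro hk best vis g hnd hb hg
    have hkn : k < nums.length := by omega
    set n : Int := (nums.length : Int) with hn
    have hi : (n - (k + 1 : Nat) : Int) < n := by push_cast; omega
    have hi0 : (0 : Int) ≤ n - (k + 1 : Nat) := by push_cast; omega
    -- totality of the chain from i
    obtain ⟨d, vis', hdfs, hnd', hb'⟩ := pvDfsA_total nums hpre (2 * nums.length + 1)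
      (n - (k + 1 : Nat)) vis 0 hnd hb (by omega) hi (by omega)
    -- split the range
    rw [PySem.List.pyRange_one_cons hi]
    -- bridge the chain in B
    have hmul : (k + 1) * (2 * nums.length + 1) = (2 * nums.length + 1) + k * (2 * nums.length + 1) := by ring
    obtain ⟨g₀, hgg, hg₀⟩ : ∃ g₀, g = (2 * nums.length + 1) + g₀ ∧ k * (2 * nums.length + 1) + 1 ≤ g₀ :=
      ⟨g - (2 * nums.length + 1), by omega, by omega⟩
    obtain ⟨g', hg', heq⟩ := pvBridge nums (2 * nums.length + 1) (n - (k + 1 : Nat)) vis 0 d vis'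
      hdfs g₀ (n - (k + 1 : Nat)) best hi
    have hsucc : (n - (k + 1 : Nat)) + 1 = n - (k : Nat) := by push_cast; ring
    obtain ⟨best'', vis'', hA, hB⟩ := ih (by omega) (max best d) vis' g' hnd' hb' (by omega)
    refine ⟨best'', vis'', ?_, ?_⟩
    · rw [List.foldl_cons]
      have hstep : pvStepA nums (some (best, vis)) (n - ((k : Int) + 1)) = some (max best d, vis') := by
        simp only [pvStepA]
        rw [show n - ((k : Int) + 1) = n - ((k + 1 : Nat) : Int) by push_cast; ring, hdfs]
      rw [show n - ((k + 1 : Nat) : Int) = n - ((k : Int) + 1) by push_cast; ring] at hsucc ⊢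
      rw [hstep, hsucc]
      exact hA
    · rw [hgg, heq, hsucc, hB]

-- ===== VERDICT (by name: the statement is the Claim_ definition above) =====
theorem arrayNesting_spec : Claim_equal_arrayNesting := by
  intro nums _ hpre
  unfold Spec_arrayNesting arrayNesting arrayNesting_alt
  obtain ⟨best', vis', hA, hB⟩ := pvOuter nums hpre nums.length le_rfl 0 [] 
    (nums.length * (2 * nums.length + 1) + 1) List.nodup_nil (by simp) le_rfl
  simp only [sub_self] at hA hB
  rw [hA, hB]
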